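-- pv_equiv track=rewrite | github.com/RomanBirov/goit-algo-fp | task_4.py | heap_to_tree_edges
-- ===== SOURCE A (Python) =====
-- def heap_to_tree_edges(heap):
--     edges = []
--     for i in range(len(heap)):
--         left = 2 * i + 1
--         right = 2 * i + 2
--
--         if left < len(heap):
--             edges.append((heap[i], heap[left]))
--         if right < len(heap):
--             edges.append((heap[i], heap[right]))
--
--     return edges
-- ===== SOURCE B (Python) =====
-- def heap_to_tree_edges(heap):
--     parents = [x for x in heap for _ in range(2)]
--     return list(zip(parents, heap[1:]))
-- ===== Notes on version B (the rewrite author's own statement) =====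
-- stated objective: alternative
-- what changed: B does no index arithmetic at all: it builds a duplicated parent stream [x for x in heap for _ in range(2)] and zips it with heap[1:], whereas A loops over parent indices with bounds checks emitting up to two children.
import Mathlib
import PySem

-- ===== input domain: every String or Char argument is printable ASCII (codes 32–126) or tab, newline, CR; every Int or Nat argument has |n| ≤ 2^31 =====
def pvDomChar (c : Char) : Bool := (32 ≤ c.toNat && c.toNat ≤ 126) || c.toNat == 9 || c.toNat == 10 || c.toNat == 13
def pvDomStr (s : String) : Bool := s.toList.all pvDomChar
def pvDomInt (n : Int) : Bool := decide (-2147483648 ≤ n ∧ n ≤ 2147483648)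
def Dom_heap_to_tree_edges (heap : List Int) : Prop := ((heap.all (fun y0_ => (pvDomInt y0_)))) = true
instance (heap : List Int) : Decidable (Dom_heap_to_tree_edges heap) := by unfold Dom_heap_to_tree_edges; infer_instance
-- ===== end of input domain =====

-- B avoids index arithmetic entirely: it zips a duplicated parent stream
-- [x for x in heap for _ in range(2)] with the children heap[1:], instead of
-- A's bounds-checked loop over parent indices; objective: alternative.


-- ===== PORT A =====
-- loop body of A; the loop only reads heap[i], heap[left], heap[right] at indices it
-- has checked to be in range, so pyGetD's default 0 is never the result
def heapStepA (heap : List Int) (edges : List (Int × Int)) (i : Int) : List (Int × Int) :=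
  let left := 2 * i + 1
  let right := 2 * i + 2
  let edges := if left < (heap.length : Int) then
      edges ++ [(PySem.List.pyGetD heap i 0, PySem.List.pyGetD heap left 0)] else edges
  if right < (heap.length : Int) then
      edges ++ [(PySem.List.pyGetD heap i 0, PySem.List.pyGetD heap right 0)] else edges

def heap_to_tree_edges (heap : List Int) : List (Int × Int) :=
  (PySem.List.pyRange 0 (heap.length : Int) 1).foldl (heapStepA heap) []

-- ===== PORT B =====
-- parents = [x for x in heap for _ in range(2)]; return list(zip(parents, heap[1:]))
def heap_to_tree_edges_alt (heap : List Int) : List (Int × Int) :=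
  let parents := heap.flatMap (fun x => [x, x])
  parents.zip (PySem.List.slice heap (some 1) none)

-- ===== PRECONDITION & SPEC =====
def Spec_heap_to_tree_edges (heap : List Int) (out : List (Int × Int)) : Prop := out = heap_to_tree_edges_alt heap
instance (heap : List Int) (out : List (Int × Int)) : Decidable (Spec_heap_to_tree_edges heap out) := by unfold Spec_heap_to_tree_edges; infer_instance

-- ===== CLAIM (what is proved, stated in full; the proofs are below) =====
def Claim_equal_heap_to_tree_edges : Prop := ∀ (heap : List Int), Dom_heap_to_tree_edges heap → Spec_heap_to_tree_edges heap (heap_to_tree_edges heap)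

-- ===== LEMMAS AND PROOFS =====

theorem stepA_both (heap : List Int) (edges : List (Int × Int)) (i : Int)
    (h1 : 2 * i + 1 < (heap.length : Int)) (h2 : 2 * i + 2 < (heap.length : Int)) :
    heapStepA heap edges i = edges ++ [(PySem.List.pyGetD heap i 0, PySem.List.pyGetD heap (2*i+1) 0),
      (PySem.List.pyGetD heap i 0, PySem.List.pyGetD heap (2*i+2) 0)] := by
  simp [heapStepA, h1, h2]

theorem stepA_left (heap : List Int) (edges : List (Int × Int)) (i : Int)
    (h1 : 2 * i + 1 < (heap.length : Int)) (h2 : ¬ 2 * i + 2 < (heap.length : Int)) :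
    heapStepA heap edges i = edges ++ [(PySem.List.pyGetD heap i 0, PySem.List.pyGetD heap (2*i+1) 0)] := by
  simp [heapStepA, h1, h2]

theorem stepA_none (heap : List Int) (edges : List (Int × Int)) (i : Int)
    (h1 : ¬ 2 * i + 1 < (heap.length : Int)) (h2 : ¬ 2 * i + 2 < (heap.length : Int)) :
    heapStepA heap edges i = edges := by
  simp [heapStepA, h1, h2]

-- A's fold, run for the first k parent indices, lists the edges of the first
-- min(2k+1, n) - 1 children in child-index order
theorem heap_fold_eq_map (heap : List Int) (k : Nat) (hk : k ≤ heap.length) :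
    (PySem.List.pyRange 0 (k : Int) 1).foldl (heapStepA heap) [] =
    (PySem.List.pyRange 1 (min (2 * (k : Int) + 1) (heap.length : Int)) 1).map (fun j =>
      (PySem.List.pyGetD heap (PySem.Int.floordiv (j - 1) 2) 0, PySem.List.pyGetD heap j 0)) := by
  induction k with
  | zero =>
      rw [PySem.List.pyRange_one_eq_nil (by omega), PySem.List.pyRange_one_eq_nil (by omega)]
      rfl
  | succ k ih =>
      have hkk : (k : Int) < (heap.length : Int) := by exact_mod_cast hk
      have hcast : ((k + 1 : Nat) : Int) = (k : Int) + 1 := by push_cast; ring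
      rw [hcast, PySem.List.pyRange_one_succ_right (a := 0) (b := (k : Int)) (by omega),
        List.foldl_append, ih (Nat.le_of_succ_le hk), List.foldl_cons, List.foldl_nil]
      have hd1 : PySem.Int.floordiv (2 * (k : Int) + 1 - 1) 2 = (k : Int) := by
        rw [PySem.Int.floordiv_eq_ediv_of_pos (by omega)]; omega
      have hd2 : PySem.Int.floordiv (2 * (k : Int) + 2 - 1) 2 = (k : Int) := by
        rw [PySem.Int.floordiv_eq_ediv_of_pos (by omega)]; omega
      by_cases h2 : 2 * (k : Int) + 2 < (heap.length : Int)
      · have h1 : 2 * (k : Int) + 1 < (heap.length : Int) := by omega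
        have hsplit : PySem.List.pyRange 1 (min (2 * ((k : Int) + 1) + 1) (heap.length : Int)) 1 =
            PySem.List.pyRange 1 (min (2 * (k : Int) + 1) (heap.length : Int)) 1
              ++ [2 * (k : Int) + 1, 2 * (k : Int) + 2] := by
          have e1 : min (2 * (k : Int) + 1) (heap.length : Int) = 2 * (k : Int) + 1 := by omega
          have e2 : min (2 * ((k : Int) + 1) + 1) (heap.length : Int) = (2 * (k : Int) + 2) + 1 := by
            omega
          rw [e1, e2,
            PySem.List.pyRange_one_succ_right (a := 1) (b := 2 * (k : Int) + 2) (by omega),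
            show (2 * (k : Int) + 2) = (2 * (k : Int) + 1) + 1 from by ring,
            PySem.List.pyRange_one_succ_right (a := 1) (b := 2 * (k : Int) + 1) (by omega)]
          simp [List.append_assoc]
        rw [stepA_both heap _ _ h1 h2, hsplit, List.map_append]
        simp only [List.map_cons, List.map_nil, hd1, hd2]
      · by_cases h1 : 2 * (k : Int) + 1 < (heap.length : Int)
        · have hsplit : PySem.List.pyRange 1 (min (2 * ((k : Int) + 1) + 1) (heap.length : Int)) 1 =
              PySem.List.pyRange 1 (min (2 * (k : Int) + 1) (heap.length : Int)) 1
                ++ [2 * (k : Int) + 1] := by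
            have e1 : min (2 * (k : Int) + 1) (heap.length : Int) = 2 * (k : Int) + 1 := by omega
            have e2 : min (2 * ((k : Int) + 1) + 1) (heap.length : Int) = (2 * (k : Int) + 1) + 1 := by
              omega
            rw [e1, e2,
              PySem.List.pyRange_one_succ_right (a := 1) (b := 2 * (k : Int) + 1) (by omega)]
          rw [stepA_left heap _ _ h1 h2, hsplit, List.map_append]
          simp only [List.map_cons, List.map_nil, hd1]
        · have hsame : min (2 * ((k : Int) + 1) + 1) (heap.length : Int) =
              min (2 * (k : Int) + 1) (heap.length : Int) := by omega
          rw [stepA_none heap _ _ h1 h2, hsame]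

-- the duplicated parent stream reads its k-th element at heap[k/2]
theorem dup_getElem (l : List Int) (k : Nat) (hk : k < (l.flatMap (fun x => [x, x])).length)
    (hk2 : k / 2 < l.length) :
    (l.flatMap (fun x => [x, x]))[k] = l[k / 2] := by
  induction l generalizing k with
  | nil => simp at hk2
  | cons x xs ih =>
      match k, hk with
      | 0, _ => simp
      | 1, _ => simp
      | (m + 2), hk =>
          have hlen : (xs.flatMap (fun x => [x, x])).length = 2 * xs.length := by
            simp [List.length_flatMap]; omega
          have hm : m < (xs.flatMap (fun x => [x, x])).length := by
            simp [List.flatMap_cons] at hk; simpa [hlen] using by omega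
          have hm2 : m / 2 < xs.length := by omega
          have : ((x :: xs).flatMap (fun x => [x, x]))[m + 2] =
              (xs.flatMap (fun x => [x, x]))[m] := by
            simp [List.flatMap_cons]
          rw [this, ih m hm hm2]
          have : (m + 2) / 2 = m / 2 + 1 := by omega
          simp [this]

-- ===== VERDICT (by name: the statement is the Claim_ definition above) =====
theorem heap_to_tree_edges_spec : Claim_equal_heap_to_tree_edges := by
  intro heap _
  unfold Spec_heap_to_tree_edges heap_to_tree_edges heap_to_tree_edges_alt
  rw [heap_fold_eq_map heap heap.length le_rfl,
    show min (2 * (heap.length : Int) + 1) (heap.length : Int) = (heap.length : Int) from by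
      omega, PySem.List.slice_from_one]
  apply List.ext_getElem
  · simp [PySem.List.length_pyRange_one, List.length_flatMap, List.length_tail]
    omega
  · intro k h1 h2
    have hklt : k < heap.length - 1 := by
      simpa [PySem.List.length_pyRange_one] using by
        have := h1; simp [PySem.List.length_pyRange_one] at this; omega
    have hk1 : k + 1 < heap.length := by omega
    have hk2 : k / 2 < heap.length := by omega
    rw [List.getElem_map, PySem.List.getElem_pyRange_one, List.getElem_zip]
    have hfd : PySem.Int.floordiv (1 + (k : Int) - 1) 2 = ((k / 2 : Nat) : Int) := by
      rw [PySem.Int.floordiv_eq_ediv_of_pos (by omega)]; omega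
    have hj : (1 + (k : Int)) = ((k + 1 : Nat) : Int) := by push_cast; ring
    rw [hfd, hj, PySem.List.pyGetD_natCast, PySem.List.pyGetD_natCast,
      List.getD_eq_getElem _ _ hk2, List.getD_eq_getElem _ _ hk1,
      dup_getElem heap k (by simpa using h2.trans_le (by simp)) hk2,
      List.getElem_tail]
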